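-- pv_equiv track=rewrite | github.com/Trofimov44/MIREA_Semester4 | Python/Tasks/task10.py | step1
-- ===== SOURCE A (Python) =====
-- def step1(table_step1):
--     if not table_step1:
--         table_step2 = []
--     else:
--         non_empty_cols = []
--         for col_idx in range(len(table_step1[0])):
--             col_data = [row[col_idx] for row in table_step1]
--             if any(cell is not None for cell in col_data):
--                 non_empty_cols.append(col_idx)
--
--         table_step2 = []
--         for row in table_step1:
--             new_row = [row[col_idx] for col_idx in non_empty_cols]
--             table_step2.append(new_row)
--     return table_step2
-- ===== SOURCE B (Python) =====
-- def step1(table_step1):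
--     # Recursive column-by-column decomposition: peel off the first column,
--     # recurse on the rest, and cons the column back only if it has a non-None cell.
--     if not table_step1 or not table_step1[0]:
--         return [[] for _ in table_step1]
--     heads = [row[0] for row in table_step1]
--     rest = step1([row[1:] for row in table_step1])
--     if any(h is not None for h in heads):
--         return [[h] + r for h, r in zip(heads, rest)]
--     return rest
-- ===== Notes on version B (the rewrite author's own statement) =====
-- stated objective: alternative
-- what changed: B replaces A's two staged index passes (scan column indices into a kept-index list, then rebuild each row by indexing) with a recursion on the column structure: peel the first column off every row, recurse on the row tails, and cons the column back only if it contains a non-None cell; no index list or indexing is used.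
import Mathlib
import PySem

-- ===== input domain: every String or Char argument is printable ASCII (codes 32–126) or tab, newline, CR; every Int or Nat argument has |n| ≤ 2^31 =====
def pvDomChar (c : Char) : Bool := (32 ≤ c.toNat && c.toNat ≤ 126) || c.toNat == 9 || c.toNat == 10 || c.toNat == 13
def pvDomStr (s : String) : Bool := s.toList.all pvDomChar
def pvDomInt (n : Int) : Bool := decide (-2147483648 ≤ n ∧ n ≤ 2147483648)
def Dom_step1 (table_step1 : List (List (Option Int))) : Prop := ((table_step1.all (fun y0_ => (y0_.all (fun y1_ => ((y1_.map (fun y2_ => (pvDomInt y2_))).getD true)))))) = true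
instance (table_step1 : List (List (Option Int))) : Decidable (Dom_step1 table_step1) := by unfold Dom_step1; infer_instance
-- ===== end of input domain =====

-- B drops all-None columns by recursion on the column structure (peel first column, recurse on row tails),
-- instead of A's two staged passes (index scan, then per-row rebuild); alternative decomposition, same cost.

-- ===== PORT A =====
def step1 (table_step1 : List (List (Option Int))) : List (List (Option Int)) :=
  if table_step1 = [] then []
  else
    -- row[col_idx]: in range under Pre_step1 (Python raises IndexError outside; getD used, those inputs are excluded)
    let nonEmptyCols : List Nat :=
      (List.range (table_step1.headD []).length).foldl
        (fun acc colIdx =>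
          let colData := table_step1.map (fun row => row.getD colIdx none)
          if colData.any (fun cell => cell ≠ none) then acc ++ [colIdx] else acc) []
    table_step1.foldl
      (fun acc row => acc ++ [nonEmptyCols.map (fun colIdx => row.getD colIdx none)]) []

-- ===== PORT B =====
-- row[0] (ported as headD none) is in range under Pre_step1; Python raises IndexError outside, excluded by Pre_.
def step1_alt (table_step1 : List (List (Option Int))) : List (List (Option Int)) :=
  if h : table_step1 = [] ∨ table_step1.headD [] = [] then table_step1.map (fun _ => [])
  else
    let heads := table_step1.map (fun row => row.headD none)
    let rest := step1_alt (table_step1.map List.tail)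
    if heads.any (fun h => h ≠ none) then List.zipWith (fun h r => h :: r) heads rest
    else rest
termination_by (table_step1.headD []).length
decreasing_by
  rw [not_or] at h
  obtain ⟨hne, hh⟩ := h
  cases table_step1 with
  | nil => exact (hne rfl).elim
  | cons r rs =>
    cases r with
    | nil => simp at hh
    | cons a as => simp

-- ===== PRECONDITION & SPEC =====
-- Pre_ excludes exactly the ragged tables on which A raises IndexError (some row shorter than the first row).
def Pre_step1 (table_step1 : List (List (Option Int))) : Prop :=
  ∀ r ∈ table_step1, (table_step1.headD []).length ≤ r.length
instance (table_step1 : List (List (Option Int))) : Decidable (Pre_step1 table_step1) := by unfold Pre_step1; infer_instance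

def pvWitness_step1 : List (List (Option Int)) := [[none, some 1], [some 2, none]]

def Spec_step1 (table_step1 : List (List (Option Int))) (out : List (List (Option Int))) : Prop := out = step1_alt table_step1
instance (table_step1 : List (List (Option Int))) (out : List (List (Option Int))) : Decidable (Spec_step1 table_step1 out) := by unfold Spec_step1; infer_instance

-- ===== CLAIM (what is proved, stated in full; the proofs are below) =====
def Claim_equal_step1 : Prop := ∀ (table_step1 : List (List (Option Int))), Dom_step1 table_step1 → Pre_step1 table_step1 → Spec_step1 table_step1 (step1 table_step1)

-- ===== LEMMAS AND PROOFS =====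

theorem pv_getD_zero (l : List (Option Int)) : l.headD none = l.getD 0 none := by
  cases l <;> simp

theorem pv_zipWith_cons_map_map {α : Type} (l : List α)
    (f : α → Option Int) (g : α → List (Option Int)) :
    List.zipWith (fun h r => h :: r) (l.map f) (l.map g) = l.map (fun x => f x :: g x) := by
  induction l with
  | nil => rfl
  | cons x xs ih => simp [ih]

theorem pv_tail_getD (l : List (Option Int)) (i : Nat) :
    l.tail.getD i none = l.getD (i + 1) none := by
  cases l <;> simp

-- characterisation of B: for a table whose rows all have length ≥ m = first-row length,
-- B selects exactly the column indices in (range m) whose column has a non-None cell.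
theorem alt_eq : ∀ (m : Nat) (t : List (List (Option Int))),
    (t.headD []).length = m → (∀ r ∈ t, m ≤ r.length) →
    step1_alt t = t.map (fun row =>
      ((List.range m).filter
        (fun i => (t.map (fun row => row.getD i none)).any (fun c => c ≠ none))).map
        (fun i => row.getD i none)) := by
  intro m
  induction m with
  | zero =>
    intro t hh _
    have hcond : t = [] ∨ t.headD [] = [] := by
      cases t with
      | nil => exact Or.inl rfl
      | cons r rs => exact Or.inr (by simpa using (List.length_eq_zero_iff.mp (by simpa using hh)))
    rw [step1_alt, dif_pos hcond]
    simp
  | succ k ih =>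
    intro t hh hall
    have hne : t ≠ [] := by
      intro hc; rw [hc] at hh; simp at hh
    have hhne : t.headD [] ≠ [] := by
      intro hc; rw [hc] at hh; simp at hh
    rw [step1_alt, dif_neg (by rw [not_or]; exact ⟨hne, hhne⟩)]
    simp only []
    -- recursive call on the row tails
    have hth : ((t.map List.tail).headD []).length = k := by
      cases t with
      | nil => exact absurd rfl hne
      | cons r rs =>
        have : r.length = k + 1 := by simpa using hh
        cases r with
        | nil => simp at this
        | cons a as => simp at this ⊢; omega
    have htall : ∀ r ∈ t.map List.tail, k ≤ r.length := by
      intro r hr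
      obtain ⟨r0, hr0, rfl⟩ := List.mem_map.mp hr
      have := hall r0 hr0
      have : r0.tail.length = r0.length - 1 := by simp
      omega
    rw [ih (t.map List.tail) hth htall]
    -- rewrite the tail-side column test as a shifted test on t
    have hq : ∀ i, ((t.map List.tail).map (fun row => row.getD i none))
        = t.map (fun row => row.getD (i + 1) none) := by
      intro i
      rw [List.map_map]
      exact List.map_congr_left (fun r _ => by simpa [Function.comp] using pv_tail_getD r i)
    set q : Nat → Bool := fun i => (t.map (fun row => row.getD i none)).any (fun c => decide (c ≠ none)) with hqdef
    have hrest : (t.map List.tail).map (fun row =>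
        ((List.range k).filter
          (fun i => ((t.map List.tail).map (fun row => row.getD i none)).any (fun c => c ≠ none))).map
          (fun i => row.getD i none))
        = t.map (fun row =>
            (((List.range k).filter (fun i => q (i + 1))).map (fun i => i + 1)).map
              (fun i => row.getD i none)) := by
      rw [List.map_map]
      refine List.map_congr_left (fun r _ => ?_)
      simp only [Function.comp]
      have hfil : (List.range k).filter
          (fun i => ((t.map List.tail).map (fun row => row.getD i none)).any (fun c => c ≠ none))
          = (List.range k).filter (fun i => q (i + 1)) := by
        refine List.filter_congr (fun i _ => ?_)
        rw [hq i]
      rw [hfil, List.map_map]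
      exact List.map_congr_left (fun i _ => by simpa [Function.comp] using (pv_tail_getD r i).symm)
    rw [hrest]
    -- selectors: range (k+1) filtered = optional 0 ++ shifted selectors
    have hsel : (List.range (k + 1)).filter q
        = (if q 0 then [0] else []) ++ ((List.range k).filter (fun i => q (i + 1))).map (fun i => i + 1) := by
      rw [List.range_succ_eq_map, List.filter_cons, List.filter_map]
      split_ifs <;> simp [Function.comp_def]
    have hheads : (t.map (fun row => row.headD none)).any (fun h => h ≠ none) = q 0 := by
      rw [hqdef]
      simp only []
      congr 1
      exact List.map_congr_left (fun r _ => pv_getD_zero r)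
    rw [hheads]
    by_cases h0 : q 0 = true
    · rw [if_pos h0, hsel, if_pos h0]
      rw [pv_zipWith_cons_map_map]
      refine List.map_congr_left (fun r _ => ?_)
      cases r <;> simp
    · rw [if_neg h0, hsel, if_neg h0]
      simp

-- characterisation of A (same right-hand side)
theorem a_eq (t : List (List (Option Int))) :
    step1 t = t.map (fun row =>
      ((List.range (t.headD []).length).filter
        (fun i => (t.map (fun row => row.getD i none)).any (fun c => c ≠ none))).map
        (fun i => row.getD i none)) := by
  cases t with
  | nil => simp [step1]
  | cons r rs =>
    rw [step1, if_neg (by simp)]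
    simp only []
    rw [PySem.List.foldl_append_if_eq_filter]
    rw [PySem.List.foldl_append_singleton_eq_map]
    simp

-- ===== VERDICT (by name: the statement is the Claim_ definition above) =====
theorem step1_spec : Claim_equal_step1 := by
  intro t _ hpre
  unfold Spec_step1
  rw [a_eq, alt_eq (t.headD []).length t rfl hpre]
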